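-- pv_equiv track=rewrite | github.com/pastaepiselli/Its-Esercizi | Lezione_5/valutazioneconoscenze/es3.py | even_odd_pattern
-- ===== SOURCE A (Python) =====
-- def even_odd_pattern(numbers: list[int]) -> list[int]:
--     mylist: list[int] = []
--     for item in numbers:
--
--         if item % 2 == 0:
--
--             mylist.append(item)
--
--     for item in numbers:
--
--         if item not in mylist:
--
--             mylist.append(item)
--
--
--     return mylist
-- ===== SOURCE B (Python) =====
-- def even_odd_pattern(numbers: list[int]) -> list[int]:
--     evens: list[int] = []
--     odds: list[int] = []
--     seen: set[int] = set()
--     for item in numbers: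
--         if item % 2 == 0:
--             evens.append(item)
--         elif item not in seen:
--             seen.add(item)
--             odds.append(item)
--     return evens + odds
-- ===== Notes on version B (the rewrite author's own statement) =====
-- stated objective: faster
-- what changed: One pass with two separate lists (evens with duplicates, odds deduplicated via a seen-set) concatenated at the end, instead of A's two sequential passes with a linear membership test on the single growing result list.
import Mathlib
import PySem

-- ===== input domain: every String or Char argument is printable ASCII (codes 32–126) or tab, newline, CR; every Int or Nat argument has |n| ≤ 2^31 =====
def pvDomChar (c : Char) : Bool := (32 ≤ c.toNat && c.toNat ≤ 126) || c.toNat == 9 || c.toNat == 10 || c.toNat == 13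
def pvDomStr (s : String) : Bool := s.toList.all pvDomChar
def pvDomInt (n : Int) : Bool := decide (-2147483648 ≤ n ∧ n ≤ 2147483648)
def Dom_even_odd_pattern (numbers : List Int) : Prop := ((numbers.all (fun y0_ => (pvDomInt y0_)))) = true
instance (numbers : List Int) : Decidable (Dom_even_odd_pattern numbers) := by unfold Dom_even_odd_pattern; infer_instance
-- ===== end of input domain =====

-- B replaces A's two sequential passes (second one testing membership in the growing
-- result list) by one pass keeping evens and deduplicated odds in separate lists
-- (a set for the odd dedup test), concatenated at the end; objective: faster (set lookup replaces the linear scan).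

-- ===== PORT A =====
def even_odd_pattern (numbers : List Int) : List Int :=
  let mylist :=
    numbers.foldl (fun acc item =>
      if PySem.Int.mod item 2 == 0 then acc ++ [item] else acc) []
  numbers.foldl (fun acc item =>
    if acc.contains item then acc else acc ++ [item]) mylist

-- ===== PORT B =====
def even_odd_pattern_alt (numbers : List Int) : List Int :=
  let st :=
    numbers.foldl (fun (st : List Int × PySem.Set Int × List Int) item =>
      if PySem.Int.mod item 2 == 0 then (st.1 ++ [item], st.2.1, st.2.2)
      else if PySem.Set.contains st.2.1 item then st
      else (st.1, PySem.Set.add st.2.1 item, st.2.2 ++ [item]))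
      ([], PySem.Set.empty, [])
  st.1 ++ st.2.2

-- ===== PRECONDITION & SPEC =====
def Spec_even_odd_pattern (numbers : List Int) (out : List Int) : Prop := out = even_odd_pattern_alt numbers
instance (numbers : List Int) (out : List Int) : Decidable (Spec_even_odd_pattern numbers out) := by unfold Spec_even_odd_pattern; infer_instance

-- ===== CLAIM (what is proved, stated in full; the proofs are below) =====
def Claim_equal_even_odd_pattern : Prop := ∀ (numbers : List Int), Dom_even_odd_pattern numbers → Spec_even_odd_pattern numbers (even_odd_pattern numbers)

-- ===== LEMMAS AND PROOFS =====

-- the parity test both programs use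
def pvEven (x : Int) : Bool := PySem.Int.mod x 2 == 0

-- the odd-dedup accumulation both results reduce to
def pvOdds (O : List Int) (l : List Int) : List Int :=
  l.foldl (fun O x =>
    if pvEven x then O else if O.contains x then O else O ++ [x]) O

lemma pvOdds_cons (O : List Int) (x : Int) (l : List Int) :
    pvOdds O (x :: l) =
      pvOdds (if pvEven x then O else if O.contains x then O else O ++ [x]) l := by
  simp [pvOdds, List.foldl_cons]

-- A's second loop, started on evens ++ odds, only ever appends odds
lemma pvA_second (l : List Int) : ∀ (E O : List Int),
    (∀ x ∈ E, pvEven x = true) →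
    (∀ x ∈ l, pvEven x = true → x ∈ E) →
    (∀ x ∈ O, pvEven x = false) →
    l.foldl (fun acc item => if acc.contains item then acc else acc ++ [item]) (E ++ O)
      = E ++ pvOdds O l := by
  induction l with
  | nil => intro E O _ _ _; simp [pvOdds]
  | cons x l ih =>
    intro E O hE hlE hO
    rw [List.foldl_cons, pvOdds_cons]
    by_cases hx : pvEven x = true
    · have hxE : x ∈ E := hlE x (List.mem_cons_self) hx
      have : (E ++ O).contains x = true := by
        simp; exact Or.inl hxE
      rw [this]
      simp only [hx, if_pos]
      exact ih E O hE (fun y hy => hlE y (List.mem_cons_of_mem _ hy)) hO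
    · have hxodd : pvEven x = false := by simpa using hx
      have hxE : x ∉ E := fun h => by rw [hE x h] at hxodd; exact absurd hxodd (by simp)
      have hca : (E ++ O).contains x = O.contains x := by
        simp [hxE]
      rw [hca, hxodd]
      by_cases hc : O.contains x = true
      · rw [if_pos hc, if_pos hc]
        exact ih E O hE (fun y hy => hlE y (List.mem_cons_of_mem _ hy)) hO
      · rw [if_neg hc, if_neg hc, List.append_assoc]
        refine ih E (O ++ [x]) hE (fun y hy => hlE y (List.mem_cons_of_mem _ hy)) ?_
        intro y hy
        rcases List.mem_append.mp hy with h | h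
        · exact hO y h
        · simp at h; subst h; exact hxodd

-- B's single pass, with the invariant seen = odds (as lists)
lemma pvB_fold (l : List Int) : ∀ (E O : List Int),
    l.foldl (fun (st : List Int × PySem.Set Int × List Int) item =>
      if PySem.Int.mod item 2 == 0 then (st.1 ++ [item], st.2.1, st.2.2)
      else if PySem.Set.contains st.2.1 item then st
      else (st.1, PySem.Set.add st.2.1 item, st.2.2 ++ [item])) (E, O, O)
      = (E ++ (l.filter pvEven), pvOdds O l, pvOdds O l) := by
  induction l with
  | nil => intro E O; simp [pvOdds]
  | cons x l ih =>
    intro E O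
    rw [List.foldl_cons, pvOdds_cons]
    by_cases hx : pvEven x = true
    · have hm : (PySem.Int.mod x 2 == 0) = true := hx
      simp only [hm, if_pos]
      rw [ih (E ++ [x]) O]
      simp [hx]
    · have hxodd : pvEven x = false := by simpa using hx
      have hm : (PySem.Int.mod x 2 == 0) = false := hxodd
      simp only [hm, Bool.false_eq_true, if_false, hxodd]
      rw [show List.filter pvEven (x :: l) = List.filter pvEven l from by simp [hxodd]]
      by_cases hc : O.contains x = true
      · have : PySem.Set.contains O x = true := hc
        simp only [this, if_pos, hc]
        exact ih E O
      · have hcf : O.contains x = false := by simpa using hc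
        have : PySem.Set.contains O x = false := hcf
        simp only [this, Bool.false_eq_true, if_false, hcf]
        have hxO : x ∉ O := fun h => hc (List.contains_iff_mem.mpr h)
        have hadd : PySem.Set.add O x = O ++ [x] := by
          simp [PySem.Set.add, PySem.Set.contains, hxO]
        rw [hadd]
        exact ih E (O ++ [x])

-- ===== VERDICT (by name: the statement is the Claim_ definition above) =====
theorem even_odd_pattern_spec : Claim_equal_even_odd_pattern := by
  intro numbers _
  unfold Spec_even_odd_pattern even_odd_pattern even_odd_pattern_alt
  have hA : numbers.foldl (fun acc item =>
      if PySem.Int.mod item 2 == 0 then acc ++ [item] else acc) []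
      = numbers.filter pvEven := by
    have := PySem.List.foldl_append_if pvEven (fun x => x) numbers []
    simpa [pvEven] using this
  rw [hA]
  have h2 : numbers.foldl (fun acc item =>
      if acc.contains item then acc else acc ++ [item]) (numbers.filter pvEven ++ [])
      = numbers.filter pvEven ++ pvOdds [] numbers := by
    refine pvA_second numbers (numbers.filter pvEven) [] ?_ ?_ ?_
    · intro x hx; exact (List.mem_filter.mp hx).2
    · intro x hx he; exact List.mem_filter.mpr ⟨hx, he⟩
    · intro x hx; cases hx
  have hB := pvB_fold numbers [] []
  simp only [List.append_nil] at h2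
  rw [h2]
  show _ = (numbers.foldl _ (([] : List Int), (PySem.Set.empty : PySem.Set Int), ([] : List Int))).1 ++ _
  have hemp : (PySem.Set.empty : PySem.Set Int) = ([] : List Int) := rfl
  rw [hemp, hB]
  simp
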